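-- pv_equiv track=rewrite | github.com/garysnake/CS391D_Final_Project | data/SST-2/apply_splits.py | find_phrases_in_sent
-- ===== SOURCE A (Python) =====
-- def find_phrases_in_sent(sentence, phrases_map):
--     idx = 0
--     end = len(sentence)
--     phrases_ids = []
--     while idx <= end and idx < len(sentence):
--         substr = sentence[idx:end]
--         if substr in phrases_map:
--             phrases_ids.append(phrases_map[substr])
--             idx = end + 1
--             end = len(sentence)
--         else:
--             end -= 1
--     #if end == len(sentence):
--     return phrases_ids
-- ===== SOURCE B (Python) =====
-- def find_phrases_in_sent(sentence, phrases_map):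
--     # Longest-match extraction by scanning the phrase keys at each position
--     # (max matching key length), instead of probing every suffix of
--     # decreasing length against the dict.
--     n = len(sentence)
--     ids = []
--     idx = 0
--     while idx < n:
--         best = -1
--         for key in phrases_map:
--             L = len(key)
--             if idx + L <= n and L > best and sentence[idx:idx + L] == key:
--                 best = L
--         if best < 0:
--             break
--         ids.append(phrases_map[sentence[idx:idx + best]])
--         idx += best + 1
--     return ids
-- ===== Notes on version B (the rewrite author's own statement) =====
-- stated objective: alternative
-- what changed: A repeatedly slices the suffix sentence[idx:end] for every end from len(sentence) down and probes the dict with each; B instead scans the phrase keys once per position, taking the maximum key length that matches at idx, and advances directly by that length plus one.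
import Mathlib
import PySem

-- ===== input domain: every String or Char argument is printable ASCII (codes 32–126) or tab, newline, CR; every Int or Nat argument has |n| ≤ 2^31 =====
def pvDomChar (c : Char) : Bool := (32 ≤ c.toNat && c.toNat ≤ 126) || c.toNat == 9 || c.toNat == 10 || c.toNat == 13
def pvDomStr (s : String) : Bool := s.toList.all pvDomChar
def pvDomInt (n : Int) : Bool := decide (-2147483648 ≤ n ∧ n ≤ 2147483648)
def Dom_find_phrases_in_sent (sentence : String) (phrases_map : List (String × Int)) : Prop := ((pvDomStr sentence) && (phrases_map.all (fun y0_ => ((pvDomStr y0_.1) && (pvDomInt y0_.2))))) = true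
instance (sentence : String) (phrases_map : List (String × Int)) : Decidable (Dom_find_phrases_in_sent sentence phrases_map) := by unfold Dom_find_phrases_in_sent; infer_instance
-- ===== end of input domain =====

-- B replaces A's decreasing-suffix dict probing by a max-over-matching-key-lengths scan of the phrase keys at each position; return value only.

-- ===== PORT A =====
-- A's while loop: state (idx, end_, acc); substr = sentence[idx:end_].
def pyAloop (s : List Char) (d : PySem.Dict String Int) (idx end_ : Int) (acc : List Int) : List Int :=
  if h : idx ≤ end_ ∧ idx < (s.length : Int) then
    let substr := String.ofList (PySem.List.slice s (some idx) (some end_))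
    if d.contains substr then
      pyAloop s d (end_ + 1) (s.length : Int) (acc ++ [d.getD substr 0])
    else
      pyAloop s d idx (end_ - 1) acc
  else acc
termination_by ((s.length - idx).toNat, (end_ - idx + 1).toNat)
decreasing_by
  · exact Prod.Lex.left _ _ (by omega)
  · exact Prod.Lex.right _ (by omega)

def find_phrases_in_sent (sentence : String) (phrases_map : List (String × Int)) : List Int :=
  pyAloop sentence.toList (PySem.Dict.ofList phrases_map) 0 (sentence.toList.length : Int) []

-- ===== PORT B =====
-- B's inner for-loop: best matching key length at position idx (-1 if none).
def pyBbest (s : List Char) (n idx : Nat) (keys : List String) : Int :=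
  keys.foldl (fun best key =>
    if idx + key.toList.length ≤ n ∧ (key.toList.length : Int) > best ∧
        (s.drop idx).take key.toList.length = key.toList then (key.toList.length : Int)
    else best) (-1)

-- B's while loop.
def pyBgo (s : List Char) (d : PySem.Dict String Int) (n idx : Nat) (acc : List Int) : List Int :=
  if idx < n then
    let best := pyBbest s n idx d.keys
    if best < 0 then acc
    else pyBgo s d n (idx + best.toNat + 1) (acc ++ [d.getD (String.ofList ((s.drop idx).take best.toNat)) 0])
  else acc
termination_by n - idx
decreasing_by omega

def find_phrases_in_sent_alt (sentence : String) (phrases_map : List (String × Int)) : List Int :=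
  pyBgo sentence.toList (PySem.Dict.ofList phrases_map) sentence.toList.length 0 []

-- ===== PRECONDITION & SPEC =====
def Spec_find_phrases_in_sent (sentence : String) (phrases_map : List (String × Int)) (out : List Int) : Prop := out = find_phrases_in_sent_alt sentence phrases_map
instance (sentence : String) (phrases_map : List (String × Int)) (out : List Int) : Decidable (Spec_find_phrases_in_sent sentence phrases_map out) := by unfold Spec_find_phrases_in_sent; infer_instance

-- ===== CLAIM (what is proved, stated in full; the proofs are below) =====
def Claim_equal_find_phrases_in_sent : Prop := ∀ (sentence : String) (phrases_map : List (String × Int)), Dom_find_phrases_in_sent sentence phrases_map → Spec_find_phrases_in_sent sentence phrases_map (find_phrases_in_sent sentence phrases_map)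

-- ===== LEMMAS AND PROOFS =====

-- Greatest L ≤ m with sentence[idx:idx+L] a key of d (checked from m downward, as A's end does).
def bestTo (s : List Char) (d : PySem.Dict String Int) (idx : Nat) : Nat → Option Nat
  | 0 => if d.contains (String.ofList ((s.drop idx).take 0)) then some 0 else none
  | m' + 1 =>
    if d.contains (String.ofList ((s.drop idx).take (m' + 1))) then some (m' + 1)
    else bestTo s d idx m'

theorem bestTo_of_contains (s : List Char) (d : PySem.Dict String Int) (idx m : Nat)
    (h : d.contains (String.ofList ((s.drop idx).take m)) = true) :
    bestTo s d idx m = some m := by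
  cases m with
  | zero => simp only [bestTo]; rw [if_pos h]
  | succ m' => simp only [bestTo]; rw [if_pos h]

theorem bestTo_none_iff (s : List Char) (d : PySem.Dict String Int) (idx m : Nat) :
    bestTo s d idx m = none ↔
      ∀ L ≤ m, ¬ d.contains (String.ofList ((s.drop idx).take L)) = true := by
  induction m with
  | zero =>
    simp only [bestTo]
    split_ifs with h
    · constructor
      · intro hc; exact absurd hc (by simp)
      · intro hall; exact absurd h (hall 0 le_rfl)
    · constructor
      · intro _ L hL
        have : L = 0 := Nat.le_zero.mp hL
        subst this; exact h
      · intro _; rfl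
  | succ m' ih =>
    simp only [bestTo]
    split_ifs with h
    · constructor
      · intro hc; exact absurd hc (by simp)
      · intro hall; exact absurd h (hall (m' + 1) le_rfl)
    · rw [ih]
      constructor
      · intro hall L hL
        by_cases hL' : L = m' + 1
        · subst hL'; exact h
        · exact hall L (by omega)
      · intro hall L hL; exact hall L (by omega)

theorem bestTo_some_iff (s : List Char) (d : PySem.Dict String Int) (idx m L : Nat) :
    bestTo s d idx m = some L ↔
      L ≤ m ∧ d.contains (String.ofList ((s.drop idx).take L)) = true ∧
        ∀ L', L < L' → L' ≤ m → ¬ d.contains (String.ofList ((s.drop idx).take L')) = true := by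
  induction m with
  | zero =>
    simp only [bestTo]
    split_ifs with h
    · constructor
      · intro he
        have hL : L = 0 := by cases he; rfl
        subst hL
        exact ⟨le_rfl, h, fun L' h1 h2 => absurd (Nat.lt_of_lt_of_le h1 h2) (by omega)⟩
      · rintro ⟨h1, h2, _⟩
        have hL : L = 0 := by omega
        subst hL; rfl
    · constructor
      · intro he; exact absurd he (by simp)
      · rintro ⟨h1, h2, _⟩
        have hL : L = 0 := by omega
        subst hL; exact absurd h2 h
  | succ m' ih =>
    simp only [bestTo]
    split_ifs with h
    · constructor
      · intro he
        have hL : L = m' + 1 := by cases he; rfl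
        subst hL
        exact ⟨le_rfl, h, fun L' h1 h2 => absurd (Nat.lt_of_lt_of_le h1 h2) (by omega)⟩
      · rintro ⟨h1, h2, h3⟩
        by_cases hL : L = m' + 1
        · subst hL; rfl
        · exact absurd h (h3 (m' + 1) (by omega) le_rfl)
    · rw [ih]
      constructor
      · rintro ⟨h1, h2, h3⟩
        refine ⟨by omega, h2, fun L' hgt hle => ?_⟩
        by_cases hL' : L' = m' + 1
        · subst hL'; exact h
        · exact h3 L' hgt (by omega)
      · rintro ⟨h1, h2, h3⟩
        have hL : L ≤ m' := by
          by_cases hL' : L = m' + 1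
          · subst hL'; exact absurd h2 h
          · omega
        exact ⟨hL, h2, fun L' hgt hle => h3 L' hgt (by omega)⟩

-- Characterisation of B's inner fold: it computes max(b, lengths of matching keys).
theorem foldBest_char (s : List Char) (n idx : Nat) (keys : List String) (b : Int) :
    (keys.foldl (fun best key =>
        if idx + key.toList.length ≤ n ∧ (key.toList.length : Int) > best ∧
            (s.drop idx).take key.toList.length = key.toList then (key.toList.length : Int)
        else best) b = b ∨
      ∃ k ∈ keys, idx + k.toList.length ≤ n ∧ (s.drop idx).take k.toList.length = k.toList ∧
        keys.foldl (fun best key =>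
          if idx + key.toList.length ≤ n ∧ (key.toList.length : Int) > best ∧
              (s.drop idx).take key.toList.length = key.toList then (key.toList.length : Int)
          else best) b = (k.toList.length : Int)) ∧
    b ≤ keys.foldl (fun best key =>
        if idx + key.toList.length ≤ n ∧ (key.toList.length : Int) > best ∧
            (s.drop idx).take key.toList.length = key.toList then (key.toList.length : Int)
        else best) b ∧
    ∀ k ∈ keys, idx + k.toList.length ≤ n → (s.drop idx).take k.toList.length = k.toList →
      (k.toList.length : Int) ≤ keys.foldl (fun best key =>
        if idx + key.toList.length ≤ n ∧ (key.toList.length : Int) > best ∧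
            (s.drop idx).take key.toList.length = key.toList then (key.toList.length : Int)
        else best) b := by
  induction keys generalizing b with
  | nil => exact ⟨Or.inl rfl, le_rfl, fun k hk => absurd hk (List.not_mem_nil)⟩
  | cons k keys ih =>
    simp only [List.foldl_cons]
    set b' := (if idx + k.toList.length ≤ n ∧ (k.toList.length : Int) > b ∧
        (s.drop idx).take k.toList.length = k.toList then (k.toList.length : Int) else b) with hb'
    obtain ⟨ih1, ih2, ih3⟩ := ih b'
    have hbb' : b ≤ b' := by
      rw [hb']; split_ifs with hc
      · exact le_of_lt hc.2.1
      · exact le_rfl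
    refine ⟨?_, le_trans hbb' ih2, ?_⟩
    · rcases ih1 with h1 | ⟨k', hk', hc1, hc2, hfe⟩
      · by_cases hc : idx + k.toList.length ≤ n ∧ (k.toList.length : Int) > b ∧
            (s.drop idx).take k.toList.length = k.toList
        · have hbv : b' = (k.toList.length : Int) := by rw [hb', if_pos hc]
          exact Or.inr ⟨k, List.mem_cons_self, hc.1, hc.2.2, h1.trans hbv⟩
        · have hbv : b' = b := by rw [hb', if_neg hc]
          exact Or.inl (h1.trans hbv)
      · exact Or.inr ⟨k', List.mem_cons_of_mem _ hk', hc1, hc2, hfe⟩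
    · intro k' hk' h1 h2
      rcases List.mem_cons.mp hk' with hk' | hk'
      · subst hk'
        by_cases hgt : (k'.toList.length : Int) > b
        · have : b' = (k'.toList.length : Int) := by rw [hb', if_pos ⟨h1, hgt, h2⟩]
          rw [← this]; exact ih2
        · exact le_trans (le_trans (by omega) hbb') ih2
      · exact ih3 k' hk' h1 h2

theorem pyBbest_eq_bestTo (s : List Char) (d : PySem.Dict String Int) (idx : Nat)
    (hidx : idx < s.length) :
    pyBbest s s.length idx d.keys =
      (match bestTo s d idx (s.length - idx) with
        | some L => (L : Int)
        | none => -1) := by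
  simp only [pyBbest]
  have hCiff : ∀ L : Nat, L ≤ s.length - idx →
      (d.contains (String.ofList ((s.drop idx).take L)) = true ↔
        ∃ k ∈ d.keys, (s.drop idx).take L = k.toList ∧ k.toList.length = L) := by
    intro L hL
    rw [PySem.Dict.contains_eq_decide_mem_keys, decide_eq_true_eq]
    constructor
    · intro hmem
      refine ⟨String.ofList ((s.drop idx).take L), hmem, ?_, ?_⟩
      · rw [String.toList_ofList]
      · rw [String.toList_ofList]
        simp only [List.length_take, List.length_drop]
        omega
    · rintro ⟨k, hk, heq, _⟩
      rw [heq, String.ofList_toList]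
      exact hk
  obtain ⟨p1, p2, p3⟩ := foldBest_char s s.length idx d.keys (-1)
  rcases hb : bestTo s d idx (s.length - idx) with _ | L
  · -- no matching length at all
    have hall := (bestTo_none_iff s d idx (s.length - idx)).mp hb
    rcases p1 with h1 | ⟨k, hk, hc1, hc2, hfe⟩
    · exact h1
    · exfalso
      have hLle : k.toList.length ≤ s.length - idx := by omega
      exact hall k.toList.length hLle
        ((hCiff k.toList.length hLle).mpr ⟨k, hk, hc2, rfl⟩)
  · obtain ⟨hLle, hC, hmax⟩ := (bestTo_some_iff s d idx (s.length - idx) L).mp hb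
    obtain ⟨k, hk, hkeq, hklen⟩ := (hCiff L hLle).mp hC
    have hge : (L : Int) ≤ List.foldl (fun best key =>
        if idx + key.toList.length ≤ s.length ∧ (key.toList.length : Int) > best ∧
            (s.drop idx).take key.toList.length = key.toList then (key.toList.length : Int)
        else best) (-1) d.keys := by
      have := p3 k hk (by omega) (by rw [hklen]; exact hkeq)
      rw [hklen] at this
      exact this
    have hle : List.foldl (fun best key =>
        if idx + key.toList.length ≤ s.length ∧ (key.toList.length : Int) > best ∧
            (s.drop idx).take key.toList.length = key.toList then (key.toList.length : Int)
        else best) (-1) d.keys ≤ (L : Int) := by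
      rcases p1 with h1 | ⟨k', hk', hc1, hc2, hfe⟩
      · rw [h1] at hge ⊢; omega
      · have hC' : d.contains (String.ofList ((s.drop idx).take k'.toList.length)) = true :=
          (hCiff k'.toList.length (by omega)).mpr ⟨k', hk', hc2, rfl⟩
        have hlen' : k'.toList.length ≤ L := by
          by_contra hgt
          exact hmax k'.toList.length (by omega) (by omega) hC'
        rw [hfe]; exact_mod_cast hlen'
    exact le_antisymm hle hge

-- A's inner decreasing-end scan reaches exactly the greatest matching length.
theorem pyAloop_scan (s : List Char) (d : PySem.Dict String Int) (idx : Nat)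
    (hidx : idx < s.length) (m : Nat) (hm : idx + m ≤ s.length) (acc : List Int) :
    pyAloop s d (idx : Int) ((idx : Int) + (m : Int)) acc =
      (match bestTo s d idx m with
        | some L => pyAloop s d ((idx : Int) + (L : Int) + 1) (s.length : Int)
            (acc ++ [d.getD (String.ofList ((s.drop idx).take L)) 0])
        | none => acc) := by
  induction m with
  | zero =>
    rw [pyAloop.eq_def, dif_pos (by constructor <;> omega)]
    simp only [PySem.List.slice_natCast_add]
    by_cases hC : d.contains (String.ofList ((s.drop idx).take 0)) = true
    · rw [if_pos hC, bestTo_of_contains s d idx 0 hC]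
    · rw [if_neg hC]
      have hb : bestTo s d idx 0 = none := by simp only [bestTo]; rw [if_neg hC]
      rw [hb]
      rw [pyAloop.eq_def, dif_neg (by omega)]
  | succ m' ih =>
    rw [pyAloop.eq_def, dif_pos (by constructor <;> omega)]
    simp only [PySem.List.slice_natCast_add]
    by_cases hC : d.contains (String.ofList ((s.drop idx).take (m' + 1))) = true
    · rw [if_pos hC, bestTo_of_contains s d idx (m' + 1) hC]
    · rw [if_neg hC]
      have harith : (idx : Int) + ((m' + 1 : Nat) : Int) - 1 = (idx : Int) + (m' : Int) := by
        push_cast; ring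
      rw [harith, ih (by omega)]
      have hb : bestTo s d idx (m' + 1) = bestTo s d idx m' := by
        simp [bestTo, hC]
      rw [hb]

theorem pyAloop_scan_none (s : List Char) (d : PySem.Dict String Int) (idx : Nat)
    (hidx : idx < s.length) (m : Nat) (hm : idx + m ≤ s.length) (acc : List Int)
    (hb : bestTo s d idx m = none) :
    pyAloop s d (idx : Int) ((idx : Int) + (m : Int)) acc = acc := by
  have h := pyAloop_scan s d idx hidx m hm acc
  rw [hb] at h
  exact h

theorem pyAloop_scan_some (s : List Char) (d : PySem.Dict String Int) (idx : Nat)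
    (hidx : idx < s.length) (m : Nat) (hm : idx + m ≤ s.length) (acc : List Int) (L : Nat)
    (hb : bestTo s d idx m = some L) :
    pyAloop s d (idx : Int) ((idx : Int) + (m : Int)) acc =
      pyAloop s d ((idx : Int) + (L : Int) + 1) (s.length : Int)
        (acc ++ [d.getD (String.ofList ((s.drop idx).take L)) 0]) := by
  have h := pyAloop_scan s d idx hidx m hm acc
  rw [hb] at h
  exact h

theorem pyBbest_none (s : List Char) (d : PySem.Dict String Int) (idx : Nat)
    (hidx : idx < s.length) (hb : bestTo s d idx (s.length - idx) = none) :
    pyBbest s s.length idx d.keys = -1 := by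
  have h := pyBbest_eq_bestTo s d idx hidx
  rw [hb] at h
  exact h

theorem pyBbest_some (s : List Char) (d : PySem.Dict String Int) (idx : Nat) (L : Nat)
    (hidx : idx < s.length) (hb : bestTo s d idx (s.length - idx) = some L) :
    pyBbest s s.length idx d.keys = (L : Int) := by
  have h := pyBbest_eq_bestTo s d idx hidx
  rw [hb] at h
  exact h

-- The two loops agree from any starting index.
theorem main_loop_eq (s : List Char) (d : PySem.Dict String Int) :
    ∀ (fuel k : Nat) (acc : List Int), s.length - k ≤ fuel →
      pyAloop s d (k : Int) (s.length : Int) acc = pyBgo s d s.length k acc := by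
  intro fuel
  induction fuel with
  | zero =>
    intro k acc hk
    rw [pyAloop.eq_def, dif_neg (by omega)]
    rw [pyBgo.eq_def, if_neg (by omega)]
  | succ fuel ih =>
    intro k acc hk
    by_cases hkn : k < s.length
    · have hsplit : ((s.length : Nat) : Int) = (k : Int) + ((s.length - k : Nat) : Int) := by
        omega
      rcases hb : bestTo s d k (s.length - k) with _ | L
      · conv_lhs => rw [hsplit]
        rw [pyAloop_scan_none s d k hkn (s.length - k) (by omega) acc hb]
        rw [pyBgo.eq_def, if_pos hkn]
        simp [pyBbest_none s d k hkn hb]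
      · conv_lhs => rw [hsplit]
        rw [pyAloop_scan_some s d k hkn (s.length - k) (by omega) acc L hb]
        rw [pyBgo.eq_def, if_pos hkn]
        simp only [pyBbest_some s d k L hkn hb]
        have hnotneg : ¬ ((L : Int) < 0) := by omega
        rw [if_neg hnotneg]
        have htn : ((L : Int)).toNat = L := by omega
        rw [htn]
        have hcast : (k : Int) + (L : Int) + 1 = ((k + L + 1 : Nat) : Int) := by push_cast; ring
        rw [hcast]
        exact ih (k + L + 1) _ (by omega)
    · rw [pyAloop.eq_def, dif_neg (by omega)]
      rw [pyBgo.eq_def, if_neg hkn]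

-- ===== VERDICT (by name: the statement is the Claim_ definition above) =====
theorem find_phrases_in_sent_spec : Claim_equal_find_phrases_in_sent := by
  intro sentence phrases_map _
  unfold Spec_find_phrases_in_sent find_phrases_in_sent find_phrases_in_sent_alt
  exact main_loop_eq _ _ sentence.toList.length 0 [] (by omega)
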